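-- pv_equiv track=rewrite | github.com/tomirio619/FourQ-SCA | code/sakura_python_interface/online_template_attack/offsets.py | parse_exec_log
-- ===== SOURCE A (Python) =====
-- def parse_exec_log(exec_log):
--     intermediate_vals_dbl_start = []
--     intermediate_vals_dbl_end = []
--     intermediate_vals_add_start = []
--     intermediate_vals_add_end = []
--
--     dbl_start_begin = "DBL begin start values"
--     dbl_start_end = "DBL end start values"
--     dbl_end_start = "DBL begin end values"
--     dbl_end_end = "DBL end end values"
--
--     add_start_begin = "ADD_core begin start values"
--     add_start_end = "ADD_core end start values"
--     add_end_start = "ADD_core begin end values"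
--     add_end_end = "ADD_core end end values"
--
--     ctr = 0
--     while ctr < len(exec_log):
--         line = exec_log[ctr]
--         if line == dbl_start_begin:
--             end = exec_log[ctr:].index(dbl_start_end)
--             intermediate_val_dbl_start = exec_log[ctr + 1: ctr + end]
--             intermediate_vals_dbl_start.append(intermediate_val_dbl_start)
--         elif line == dbl_end_start:
--             end = exec_log[ctr:].index(dbl_end_end)
--             intermediate_val_dbl_end = exec_log[ctr + 1: ctr + end]
--             intermediate_vals_dbl_end.append(intermediate_val_dbl_end)
--         elif line == add_start_begin:
--             end = exec_log[ctr:].index(add_start_end)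
--             intermediate_val_add_start = exec_log[ctr + 1: ctr + end]
--             intermediate_vals_add_start.append(intermediate_val_add_start)
--         elif line == add_end_start:
--             end = exec_log[ctr:].index(add_end_end)
--             intermediate_val_add_end = exec_log[ctr + 1: ctr + end]
--             intermediate_vals_add_end.append(intermediate_val_add_end)
--         else:
--             ctr += 1
--             continue
--         ctr += end + 1
--     return intermediate_vals_dbl_start, intermediate_vals_dbl_end, intermediate_vals_add_start, intermediate_vals_add_end
-- ===== SOURCE B (Python) =====
-- def parse_exec_log(exec_log):
--     # Single forward pass: a state machine accumulates lines between a begin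
--     # marker and its matching end marker; no suffix slicing or re-scanning.
--     dbl_start, dbl_end, add_start, add_end = [], [], [], []
--     markers = {
--         "DBL begin start values": ("DBL end start values", dbl_start),
--         "DBL begin end values": ("DBL end end values", dbl_end),
--         "ADD_core begin start values": ("ADD_core end start values", add_start),
--         "ADD_core begin end values": ("ADD_core end end values", add_end),
--     }
--     current = None  # (end_marker, bucket, accumulated lines) while inside a block
--     for line in exec_log:
--         if current is None:
--             if line in markers:
--                 end_marker, bucket = markers[line]
--                 current = (end_marker, bucket, [])
--         elif line == current[0]:
--             current[1].append(current[2])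
--             current = None
--         else:
--             current[2].append(line)
--     return dbl_start, dbl_end, add_start, add_end
-- ===== Notes on version B (the rewrite author's own statement) =====
-- stated objective: alternative
-- what changed: Replaced A's rescanning loop (which copies the suffix exec_log[ctr:] and runs .index on it for every block, then slices again) by a single forward-pass state machine that accumulates lines between a begin marker and its matching end marker; measured speed-up was below the 1.5x confirmation bar.
import Mathlib
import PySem

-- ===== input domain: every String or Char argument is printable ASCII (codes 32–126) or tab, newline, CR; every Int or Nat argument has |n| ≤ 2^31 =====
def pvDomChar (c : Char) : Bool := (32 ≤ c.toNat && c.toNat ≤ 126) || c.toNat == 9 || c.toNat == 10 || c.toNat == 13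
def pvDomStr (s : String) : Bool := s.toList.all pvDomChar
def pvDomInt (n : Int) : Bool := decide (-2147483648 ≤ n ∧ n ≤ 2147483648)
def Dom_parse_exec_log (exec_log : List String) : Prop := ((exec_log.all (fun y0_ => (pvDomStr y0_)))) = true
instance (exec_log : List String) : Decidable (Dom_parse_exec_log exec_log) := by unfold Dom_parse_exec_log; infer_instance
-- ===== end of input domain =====

-- B replaces A's per-block suffix copy + .index rescan by one forward state-machine pass (objective: alternative single-pass algorithm; not measured ≥1.5× faster).

-- ===== PORT A =====
-- the eight marker constants of A
def pvDblStartBegin : String := "DBL begin start values"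
def pvDblStartEnd : String := "DBL end start values"
def pvDblEndStart : String := "DBL begin end values"
def pvDblEndEnd : String := "DBL end end values"
def pvAddStartBegin : String := "ADD_core begin start values"
def pvAddStartEnd : String := "ADD_core end start values"
def pvAddEndStart : String := "ADD_core begin end values"
def pvAddEndEnd : String := "ADD_core end end values"

-- A's while-loop; on a begin marker it runs .index on the suffix exec_log[ctr:]
-- (none = ValueError, excluded by Pre_; the port then just returns the accumulators)
def parse_exec_log_go (log : List String) (ctr : Nat)
    (s1 s2 s3 s4 : List (List String)) :
    List (List String) × List (List String) × List (List String) × List (List String) :=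
  if h : ctr < log.length then
    if log[ctr] = pvDblStartBegin then
      match PySem.List.index? (PySem.List.slice log (some (ctr : Int)) none) pvDblStartEnd with
      | none => (s1, s2, s3, s4)  -- Python raises ValueError here (excluded by Pre_)
      | some e =>
          parse_exec_log_go log (ctr + e + 1)
            (s1 ++ [PySem.List.slice log (some ((ctr : Int) + 1)) (some ((ctr : Int) + (e : Int)))]) s2 s3 s4
    else if log[ctr] = pvDblEndStart then
      match PySem.List.index? (PySem.List.slice log (some (ctr : Int)) none) pvDblEndEnd with
      | none => (s1, s2, s3, s4)
      | some e =>
          parse_exec_log_go log (ctr + e + 1)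
            s1 (s2 ++ [PySem.List.slice log (some ((ctr : Int) + 1)) (some ((ctr : Int) + (e : Int)))]) s3 s4
    else if log[ctr] = pvAddStartBegin then
      match PySem.List.index? (PySem.List.slice log (some (ctr : Int)) none) pvAddStartEnd with
      | none => (s1, s2, s3, s4)
      | some e =>
          parse_exec_log_go log (ctr + e + 1)
            s1 s2 (s3 ++ [PySem.List.slice log (some ((ctr : Int) + 1)) (some ((ctr : Int) + (e : Int)))]) s4
    else if log[ctr] = pvAddEndStart then
      match PySem.List.index? (PySem.List.slice log (some (ctr : Int)) none) pvAddEndEnd with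
      | none => (s1, s2, s3, s4)
      | some e =>
          parse_exec_log_go log (ctr + e + 1)
            s1 s2 s3 (s4 ++ [PySem.List.slice log (some ((ctr : Int) + 1)) (some ((ctr : Int) + (e : Int)))])
    else
      parse_exec_log_go log (ctr + 1) s1 s2 s3 s4
  else (s1, s2, s3, s4)
termination_by log.length - ctr
decreasing_by all_goals omega

def parse_exec_log (exec_log : List String) :
    List (List String) × List (List String) × List (List String) × List (List String) :=
  parse_exec_log_go exec_log 0 [] [] [] []

-- ===== PORT B =====
-- Source B's markers dict: begin marker ↦ (end marker, bucket index of the target list)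
def pvB_begin? (line : String) : Option (String × Nat) :=
  if line = "DBL begin start values" then some ("DBL end start values", 0)
  else if line = "DBL begin end values" then some ("DBL end end values", 1)
  else if line = "ADD_core begin start values" then some ("ADD_core end start values", 2)
  else if line = "ADD_core begin end values" then some ("ADD_core end end values", 3)
  else none

-- current[1].append(current[2]) : append the finished block to its bucket
def pvB_push
    (res : List (List String) × List (List String) × List (List String) × List (List String))
    (b : Nat) (block : List String) :
    List (List String) × List (List String) × List (List String) × List (List String) :=
  match b with
  | 0 => (res.1 ++ [block], res.2.1, res.2.2.1, res.2.2.2)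
  | 1 => (res.1, res.2.1 ++ [block], res.2.2.1, res.2.2.2)
  | 2 => (res.1, res.2.1, res.2.2.1 ++ [block], res.2.2.2)
  | _ => (res.1, res.2.1, res.2.2.1, res.2.2.2 ++ [block])

-- one iteration of Source B's for-loop; the Option is Source B's `current`
def pvB_step
    (st : (List (List String) × List (List String) × List (List String) × List (List String)) ×
          Option (String × Nat × List String)) (line : String) :
    (List (List String) × List (List String) × List (List String) × List (List String)) ×
    Option (String × Nat × List String) :=
  match st.2 with
  | none =>
      match pvB_begin? line with
      | some (em, b) => (st.1, some (em, b, []))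
      | none => st
  | some (em, b, acc) =>
      if line = em then (pvB_push st.1 b acc, none)
      else (st.1, some (em, b, acc ++ [line]))

def parse_exec_log_alt (exec_log : List String) :
    List (List String) × List (List String) × List (List String) × List (List String) :=
  (exec_log.foldl pvB_step (([], [], [], []), none)).1

-- ===== PRECONDITION & SPEC =====
def pvPairs : List (String × String) :=
  [(pvDblStartBegin, pvDblStartEnd), (pvDblEndStart, pvDblEndEnd),
   (pvAddStartBegin, pvAddStartEnd), (pvAddEndStart, pvAddEndEnd)]

-- the well-formed-log grammar: (plain-line | begin-marker non-end-line* matching-end-marker)*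
-- (a grammar-membership check over the input only; it computes no output of either port;
-- the Option argument is "the end marker of the block currently open, if any")
def pvWF : Option String → List String → Bool
  | none, [] => true
  | none, l :: rest =>
    match pvPairs.lookup l with
    | none => pvWF none rest
    | some em => pvWF (some em) rest
  | some _, [] => false
  | some em, l :: rest => if l = em then pvWF none rest else pvWF (some em) rest

-- Pre_ excludes exactly the logs on which A raises ValueError: those where the scan
-- reaches a begin marker with no matching end marker at or after it (the log is not
-- generated by the block grammar above).
def Pre_parse_exec_log (exec_log : List String) : Prop := pvWF none exec_log = true

instance (exec_log : List String) : Decidable (Pre_parse_exec_log exec_log) := by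
  unfold Pre_parse_exec_log; infer_instance

def pvWitness_parse_exec_log : List String :=
  ["DBL begin start values", "line 1", "DBL end start values",
   "ADD_core begin end values", "ADD_core end end values"]

def Spec_parse_exec_log (exec_log : List String)
    (out : List (List String) × List (List String) × List (List String) × List (List String)) :
    Prop := out = parse_exec_log_alt exec_log
instance (exec_log : List String)
    (out : List (List String) × List (List String) × List (List String) × List (List String)) :
    Decidable (Spec_parse_exec_log exec_log out) := by unfold Spec_parse_exec_log; infer_instance

-- ===== CLAIM (what is proved, stated in full; the proofs are below) =====
def Claim_equal_parse_exec_log : Prop :=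
  ∀ (exec_log : List String), Dom_parse_exec_log exec_log →
    Pre_parse_exec_log exec_log →
    Spec_parse_exec_log exec_log (parse_exec_log exec_log)

-- ===== LEMMAS AND PROOFS =====

-- folding B's step over a segment `mid ++ em :: rest` while inside a block (em ∉ mid)
-- finishes the block with `acc ++ mid` and continues closed on `rest`
lemma pvB_stepOpen (mid : List String) :
    ∀ (rest : List String) (em : String) (b : Nat) (acc : List String)
      (res : List (List String) × List (List String) × List (List String) × List (List String)),
      em ∉ mid →
      List.foldl pvB_step (res, some (em, b, acc)) (mid ++ em :: rest)
        = List.foldl pvB_step (pvB_push res b (acc ++ mid), none) rest := by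
  induction mid with
  | nil =>
      intro rest em b acc res _
      simp [pvB_step]
  | cons x mid ih =>
      intro rest em b acc res hnm
      have hx : x ≠ em := fun h => hnm (h ▸ List.mem_cons_self)
      have hm : em ∉ mid := fun h => hnm (List.mem_cons_of_mem _ h)
      simp only [List.cons_append, List.foldl_cons]
      have hstep : pvB_step (res, some (em, b, acc)) x = (res, some (em, b, acc ++ [x])) := by
        simp [pvB_step, hx]
      rw [hstep, ih rest em b (acc ++ [x]) res hm]
      simp

-- one unfolding step of the grammar check
-- an open block is closed at the FIRST later occurrence of its end marker
lemma pvWF_open (em : String) :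
    ∀ xs : List String, pvWF (some em) xs = true →
      ∃ e, PySem.List.index? xs em = some e ∧ pvWF none (xs.drop (e + 1)) = true := by
  intro xs
  induction xs with
  | nil => intro h; simp [pvWF] at h
  | cons x rest ih =>
      intro h
      by_cases hx : x = em
      · refine ⟨0, ?_, ?_⟩
        · rw [hx]; exact PySem.List.index?_cons_self em rest
        · simpa [pvWF, hx] using h
      · obtain ⟨e, he, hwf⟩ := ih (by simpa [pvWF, hx] using h)
        refine ⟨e + 1, ?_, ?_⟩
        · rw [PySem.List.index?_cons_of_ne rest hx, he]; rfl
        · simpa using hwf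

-- a line that is no begin marker is skipped by the grammar check
lemma pvWF_skip (l : String) (rest : List String) (hl : pvPairs.lookup l = none) :
    pvWF none (l :: rest) = pvWF none rest := by
  simp [pvWF, hl]

-- anatomy of one block of A: if the end marker em first occurs at offset e of
-- log.drop ctr and log[ctr] ≠ em, then the lines strictly between are A's slice,
-- and what follows the end marker is log.drop (ctr + e + 1)
lemma pv_block (log : List String) (ctr e : Nat) (em : String)
    (h : ctr < log.length)
    (hidx : PySem.List.index? (log.drop ctr) em = some e)
    (hne : log[ctr] ≠ em) :
    ∃ mid, log.drop (ctr + 1) = mid ++ em :: log.drop (ctr + e + 1) ∧ em ∉ mid ∧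
      PySem.List.slice log (some ((ctr : Int) + 1)) (some ((ctr : Int) + (e : Int))) = mid := by
  obtain ⟨pre, suf, hsplit, hlen, hnm⟩ := (PySem.List.index?_eq_some_iff _ _ _).mp hidx
  have hdrop : log.drop ctr = log[ctr] :: log.drop (ctr + 1) := (List.getElem_cons_drop h).symm
  cases pre with
  | nil =>
      exfalso
      rw [hdrop] at hsplit
      simp only [List.nil_append, List.cons.injEq] at hsplit
      exact hne hsplit.1
  | cons x mid =>
      have hx : log[ctr] = x ∧ log.drop (ctr + 1) = mid ++ em :: suf := by
        have hsp := hsplit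
        rw [hdrop] at hsp
        simp only [List.cons_append, List.cons.injEq] at hsp
        exact hsp
      have hmlen : mid.length = e - 1 := by simp at hlen; omega
      have he1 : 1 ≤ e := by simp at hlen; omega
      have hnm' : em ∉ mid := fun hmem => hnm (List.mem_cons_of_mem _ hmem)
      have hsuf : suf = log.drop (ctr + e + 1) := by
        have h1 : log.drop (ctr + e + 1) = (log.drop ctr).drop (e + 1) := by
          rw [List.drop_drop]; ring_nf
        rw [h1, hsplit]
        have : (x :: mid) ++ em :: suf = ((x :: mid) ++ [em]) ++ suf := by simp
        rw [this]
        have hl : ((x :: mid) ++ [em]).length = e + 1 := by simp; omega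
        rw [← hl, List.drop_left]
      refine ⟨mid, by rw [hx.2, hsuf], hnm', ?_⟩
      have hc1 : (ctr : Int) + 1 = ((ctr + 1 : Nat) : Int) := by push_cast; ring
      have hc2 : (ctr : Int) + (e : Int) = ((ctr + e : Nat) : Int) := by push_cast; ring
      rw [hc1, hc2, PySem.List.slice_natCast]
      rw [hx.2, hsuf]
      have : ctr + e - (ctr + 1) = mid.length := by omega
      rw [this, List.take_left]

lemma pv_main (log : List String) :
    ∀ (n ctr : Nat) (s1 s2 s3 s4 : List (List String)),
      log.length - ctr ≤ n →
      pvWF none (log.drop ctr) = true →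
      parse_exec_log_go log ctr s1 s2 s3 s4
        = (List.foldl pvB_step ((s1, s2, s3, s4), none) (log.drop ctr)).1 := by
  intro n
  induction n with
  | zero =>
      intro ctr s1 s2 s3 s4 hn _
      have h : ¬ ctr < log.length := by omega
      rw [parse_exec_log_go, dif_neg h, List.drop_of_length_le (by omega)]
      rfl
  | succ n ih =>
      intro ctr s1 s2 s3 s4 hn hwf
      by_cases h : ctr < log.length
      · have hdrop : log.drop ctr = log[ctr] :: log.drop (ctr + 1) :=
          (List.getElem_cons_drop h).symm
        rw [parse_exec_log_go, dif_pos h, PySem.List.slice_from_natCast]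
        rw [hdrop] at hwf
        by_cases h1 : log[ctr] = pvDblStartBegin
        · have hwfo : pvWF (some pvDblStartEnd) (log.drop (ctr + 1)) = true := by
            rw [h1] at hwf; exact hwf
          obtain ⟨e', hh, hwfn⟩ := pvWF_open pvDblStartEnd _ hwfo
          have hne : log[ctr] ≠ pvDblStartEnd := by rw [h1]; decide
          have hidx : PySem.List.index? (log.drop ctr) pvDblStartEnd = some (e' + 1) := by
            rw [hdrop, PySem.List.index?_cons_of_ne _ (by rw [h1]; decide), hh]; rfl
          obtain ⟨mid, hmid, hnm, hslice⟩ := pv_block log ctr (e' + 1) pvDblStartEnd h hidx hne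
          rw [if_pos h1, hidx]
          show parse_exec_log_go log (ctr + (e' + 1) + 1) _ _ _ _ = _
          have hwf' : pvWF none (log.drop (ctr + (e' + 1) + 1)) = true := by
            have hd : log.drop (ctr + (e' + 1) + 1) = (log.drop (ctr + 1)).drop (e' + 1) := by
              rw [List.drop_drop]; ring_nf
            rw [hd]; exact hwfn
          rw [hslice, ih (ctr + (e' + 1) + 1) _ _ _ _ (by omega) hwf', hdrop]
          simp only [List.foldl_cons]
          have hb : pvB_step ((s1, s2, s3, s4), none) log[ctr]
              = ((s1, s2, s3, s4), some (pvDblStartEnd, 0, ([] : List String))) := by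
            simp [pvB_step, pvB_begin?, h1, pvDblStartBegin, pvDblStartEnd]
          rw [hb, hmid, pvB_stepOpen mid _ _ _ _ _ hnm]
          simp [pvB_push]
        · rw [if_neg h1]
          by_cases h2 : log[ctr] = pvDblEndStart
          · have hwfo : pvWF (some pvDblEndEnd) (log.drop (ctr + 1)) = true := by
              rw [h2] at hwf; exact hwf
            obtain ⟨e', hh, hwfn⟩ := pvWF_open pvDblEndEnd _ hwfo
            have hne : log[ctr] ≠ pvDblEndEnd := by rw [h2]; decide
            have hidx : PySem.List.index? (log.drop ctr) pvDblEndEnd = some (e' + 1) := by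
              rw [hdrop, PySem.List.index?_cons_of_ne _ (by rw [h2]; decide), hh]; rfl
            obtain ⟨mid, hmid, hnm, hslice⟩ := pv_block log ctr (e' + 1) pvDblEndEnd h hidx hne
            rw [if_pos h2, hidx]
            show parse_exec_log_go log (ctr + (e' + 1) + 1) _ _ _ _ = _
            have hwf' : pvWF none (log.drop (ctr + (e' + 1) + 1)) = true := by
              have hd : log.drop (ctr + (e' + 1) + 1) = (log.drop (ctr + 1)).drop (e' + 1) := by
                rw [List.drop_drop]; ring_nf
              rw [hd]; exact hwfn
            rw [hslice, ih (ctr + (e' + 1) + 1) _ _ _ _ (by omega) hwf', hdrop]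
            simp only [List.foldl_cons]
            have hb : pvB_step ((s1, s2, s3, s4), none) log[ctr]
                = ((s1, s2, s3, s4), some (pvDblEndEnd, 1, ([] : List String))) := by
              simp [pvB_step, pvB_begin?, h2, pvDblEndStart, pvDblEndEnd]
            rw [hb, hmid, pvB_stepOpen mid _ _ _ _ _ hnm]
            simp [pvB_push]
          · rw [if_neg h2]
            by_cases h3 : log[ctr] = pvAddStartBegin
            · have hwfo : pvWF (some pvAddStartEnd) (log.drop (ctr + 1)) = true := by
                rw [h3] at hwf; exact hwf
              obtain ⟨e', hh, hwfn⟩ := pvWF_open pvAddStartEnd _ hwfo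
              have hne : log[ctr] ≠ pvAddStartEnd := by rw [h3]; decide
              have hidx : PySem.List.index? (log.drop ctr) pvAddStartEnd = some (e' + 1) := by
                rw [hdrop, PySem.List.index?_cons_of_ne _ (by rw [h3]; decide), hh]; rfl
              obtain ⟨mid, hmid, hnm, hslice⟩ := pv_block log ctr (e' + 1) pvAddStartEnd h hidx hne
              rw [if_pos h3, hidx]
              show parse_exec_log_go log (ctr + (e' + 1) + 1) _ _ _ _ = _
              have hwf' : pvWF none (log.drop (ctr + (e' + 1) + 1)) = true := by
                have hd : log.drop (ctr + (e' + 1) + 1) = (log.drop (ctr + 1)).drop (e' + 1) := by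
                  rw [List.drop_drop]; ring_nf
                rw [hd]; exact hwfn
              rw [hslice, ih (ctr + (e' + 1) + 1) _ _ _ _ (by omega) hwf', hdrop]
              simp only [List.foldl_cons]
              have hb : pvB_step ((s1, s2, s3, s4), none) log[ctr]
                  = ((s1, s2, s3, s4), some (pvAddStartEnd, 2, ([] : List String))) := by
                simp [pvB_step, pvB_begin?, h3, pvAddStartBegin, pvAddStartEnd]
              rw [hb, hmid, pvB_stepOpen mid _ _ _ _ _ hnm]
              simp [pvB_push]
            · rw [if_neg h3]
              by_cases h4 : log[ctr] = pvAddEndStart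
              · have hwfo : pvWF (some pvAddEndEnd) (log.drop (ctr + 1)) = true := by
                  rw [h4] at hwf; exact hwf
                obtain ⟨e', hh, hwfn⟩ := pvWF_open pvAddEndEnd _ hwfo
                have hne : log[ctr] ≠ pvAddEndEnd := by rw [h4]; decide
                have hidx : PySem.List.index? (log.drop ctr) pvAddEndEnd = some (e' + 1) := by
                  rw [hdrop, PySem.List.index?_cons_of_ne _ (by rw [h4]; decide), hh]; rfl
                obtain ⟨mid, hmid, hnm, hslice⟩ := pv_block log ctr (e' + 1) pvAddEndEnd h hidx hne
                rw [if_pos h4, hidx]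
                show parse_exec_log_go log (ctr + (e' + 1) + 1) _ _ _ _ = _
                have hwf' : pvWF none (log.drop (ctr + (e' + 1) + 1)) = true := by
                  have hd : log.drop (ctr + (e' + 1) + 1) = (log.drop (ctr + 1)).drop (e' + 1) := by
                    rw [List.drop_drop]; ring_nf
                  rw [hd]; exact hwfn
                rw [hslice, ih (ctr + (e' + 1) + 1) _ _ _ _ (by omega) hwf', hdrop]
                simp only [List.foldl_cons]
                have hb : pvB_step ((s1, s2, s3, s4), none) log[ctr]
                    = ((s1, s2, s3, s4), some (pvAddEndEnd, 3, ([] : List String))) := by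
                  simp [pvB_step, pvB_begin?, h4, pvAddEndStart, pvAddEndEnd]
                rw [hb, hmid, pvB_stepOpen mid _ _ _ _ _ hnm]
                simp [pvB_push]
              · rw [if_neg h4]
                have hlk : pvPairs.lookup log[ctr] = none := by
                  simp only [pvDblStartBegin] at h1
                  simp only [pvDblEndStart] at h2
                  simp only [pvAddStartBegin] at h3
                  simp only [pvAddEndStart] at h4
                  have e1 : (log[ctr] == "DBL begin start values") = false :=
                    beq_eq_false_iff_ne.mpr h1
                  have e2 : (log[ctr] == "DBL begin end values") = false :=
                    beq_eq_false_iff_ne.mpr h2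
                  have e3 : (log[ctr] == "ADD_core begin start values") = false :=
                    beq_eq_false_iff_ne.mpr h3
                  have e4 : (log[ctr] == "ADD_core begin end values") = false :=
                    beq_eq_false_iff_ne.mpr h4
                  simp only [pvPairs, List.lookup, pvDblStartBegin, pvDblStartEnd,
                    pvDblEndStart, pvDblEndEnd, pvAddStartBegin, pvAddStartEnd,
                    pvAddEndStart, pvAddEndEnd]
                  rw [e1, e2, e3, e4]
                have hwf' : pvWF none (log.drop (ctr + 1)) = true := by
                  rw [pvWF_skip _ _ hlk] at hwf; exact hwf
                rw [ih (ctr + 1) s1 s2 s3 s4 (by omega) hwf', hdrop]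
                simp only [List.foldl_cons]
                have hb : pvB_step ((s1, s2, s3, s4), none) log[ctr]
                    = ((s1, s2, s3, s4), none) := by
                  simp only [pvDblStartBegin] at h1
                  simp only [pvDblEndStart] at h2
                  simp only [pvAddStartBegin] at h3
                  simp only [pvAddEndStart] at h4
                  simp [pvB_step, pvB_begin?, h1, h2, h3, h4]
                rw [hb]
      · rw [parse_exec_log_go, dif_neg h, List.drop_of_length_le (by omega)]
        rfl

-- ===== VERDICT (by name: the statements are the Claim_ definitions above) =====
theorem parse_exec_log_spec : Claim_equal_parse_exec_log := by
  intro log _ hpre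
  unfold Spec_parse_exec_log parse_exec_log parse_exec_log_alt
  simpa using pv_main log log.length 0 [] [] [] [] (by omega) hpre
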